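-- pv_equiv track=rewrite | github.com/adinashby-vanier-college/programming-in-science-assignment-2-ducnguyenprog | Assignment2.py | max_two_in_list
-- ===== SOURCE A (Python) =====
-- def max_two_in_list(numbers):
--    numbers.sort(reverse = True)
--
--    if len(numbers) == 0:
--        return (None, None)
--
--    if len(numbers) == 1:
--        return (numbers[0], None)
--
--    max1 = numbers[0]
--    max2 = None
--
--    for n in numbers[1:]:
--        if n < max1:
--            max2 = n
--            break
--
--    return max1, max2
-- ===== SOURCE B (Python) =====
-- def max_two_in_list(numbers):
--     # One linear pass tracking the maximum and the largest value strictly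
--     # below it. (Unlike A, does not sort/mutate the input list.)
--     m1 = None
--     m2 = None
--     for n in numbers:
--         if m1 is None or n > m1:
--             m2 = m1
--             m1 = n
--         elif n != m1 and (m2 is None or n > m2):
--             m2 = n
--     return (m1, m2)
-- ===== Notes on version B (the rewrite author's own statement) =====
-- stated objective: faster
-- what changed: Replaced A's sort-then-scan (sort descending in place, take head, scan for first strictly smaller element) by a single linear pass tracking the maximum and the largest value strictly below it; B does not mutate the input list, which A sorts in place.
import Mathlib
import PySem

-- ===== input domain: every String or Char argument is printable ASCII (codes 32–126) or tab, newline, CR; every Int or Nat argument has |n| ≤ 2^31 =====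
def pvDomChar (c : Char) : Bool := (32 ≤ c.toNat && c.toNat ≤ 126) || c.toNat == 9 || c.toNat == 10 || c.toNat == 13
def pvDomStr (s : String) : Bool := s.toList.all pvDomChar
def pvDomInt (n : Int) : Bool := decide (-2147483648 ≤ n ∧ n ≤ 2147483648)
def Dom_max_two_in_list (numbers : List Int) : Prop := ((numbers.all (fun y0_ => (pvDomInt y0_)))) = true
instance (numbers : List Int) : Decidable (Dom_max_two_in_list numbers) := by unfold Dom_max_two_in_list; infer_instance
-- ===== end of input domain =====

-- B replaces A's sort-then-scan with one linear pass tracking the max and the largest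
-- value strictly below it (A sorts the caller's list in place; B does not mutate it —
-- the equivalence proved here is about the return value only).


-- ===== PORT A =====
-- the 'for n in numbers[1:]: if n < max1: max2 = n; break' loop of A
def pvFindLt (max1 : Int) : List Int → Option Int
  | [] => none
  | n :: rest => if n < max1 then some n else pvFindLt max1 rest

def max_two_in_list (numbers : List Int) : Option Int × Option Int :=
  -- numbers.sort(reverse=True)
  match PySem.List.sorted numbers (fun x => x) true with
  | [] => (none, none)                      -- len == 0
  | [x] => (some x, none)                   -- len == 1
  | max1 :: rest => (some max1, pvFindLt max1 rest)   -- max1 = numbers[0]; loop over numbers[1:]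

-- ===== PORT B =====
-- one step of B's loop on the state (m1, m2)
def pvStep (st : Option Int × Option Int) (n : Int) : Option Int × Option Int :=
  match st with
  | (none, _) => (some n, none)             -- m1 is None: m2 = m1 (= None); m1 = n
  | (some m1, m2) =>
    if m1 < n then (some n, some m1)        -- n > m1: m2 = m1; m1 = n
    else if n ≠ m1 then                     -- n != m1 and (m2 is None or n > m2)
      match m2 with
      | none => (some m1, some n)
      | some v => if v < n then (some m1, some n) else (some m1, some v)
    else (some m1, m2)

def max_two_in_list_alt (numbers : List Int) : Option Int × Option Int :=
  numbers.foldl pvStep (none, none)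

-- ===== PRECONDITION & SPEC =====
def Spec_max_two_in_list (numbers : List Int) (out : Option Int × Option Int) : Prop := out = max_two_in_list_alt numbers
instance (numbers : List Int) (out : Option Int × Option Int) : Decidable (Spec_max_two_in_list numbers out) := by unfold Spec_max_two_in_list; infer_instance

-- ===== CLAIM (what is proved, stated in full; the proofs are below) =====
def Claim_equal_max_two_in_list : Prop := ∀ (numbers : List Int), Dom_max_two_in_list numbers → Spec_max_two_in_list numbers (max_two_in_list numbers)

-- ===== LEMMAS AND PROOFS =====

-- B's step commutes, so its fold is invariant under permutation of the input.
set_option maxRecDepth 4096 in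
theorem pvStep_comm (st : Option Int × Option Int) (a b : Int) :
    pvStep (pvStep st a) b = pvStep (pvStep st b) a := by
  obtain ⟨m1, m2⟩ := st
  rcases m1 with _ | m1 <;> rcases m2 with _ | m2 <;>
    simp only [pvStep] <;> split_ifs <;> simp_all [Prod.ext_iff] <;>
    ((try split_ifs) <;> (try simp only [Option.some.injEq, true_and, and_true]) <;>
      (first | trivial | omega))

theorem foldl_pvStep_perm {l₁ l₂ : List Int} (h : l₁.Perm l₂) (st : Option Int × Option Int) :
    l₁.foldl pvStep st = l₂.foldl pvStep st := by
  induction h generalizing st with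
  | nil => rfl
  | cons x _ ih => simp only [List.foldl_cons]; exact ih _
  | swap x y l => simp only [List.foldl_cons, pvStep_comm]
  | trans _ _ ih₁ ih₂ => exact (ih₁ st).trans (ih₂ st)

-- once m2 holds a value n < m1 and every remaining element is ≤ n, the state is frozen
theorem foldl_pvStep_frozen (m n : Int) (hn : n < m) :
    ∀ (t : List Int), (∀ k ∈ t, k ≤ n) →
      t.foldl pvStep (some m, some n) = (some m, some n) := by
  intro t
  induction t with
  | nil => intro _; rfl
  | cons k t ih =>
    intro hle
    have hk : k ≤ n := hle k (List.mem_cons_self)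
    have hstep : pvStep (some m, some n) k = (some m, some n) := by
      simp only [pvStep]
      rw [if_neg (by omega : ¬ m < k)]
      split_ifs with h2 h3
      · omega
      · rfl
      · rfl
    rw [List.foldl_cons, hstep]
    exact ih (fun x hx => hle x (List.mem_cons_of_mem _ hx))

-- on a descending-sorted tail (all ≤ m), B's fold from (some m, none) finds
-- exactly the first element strictly below m — A's loop.
theorem foldl_pvStep_sorted (m : Int) :
    ∀ (rest : List Int), (∀ k ∈ rest, k ≤ m) → rest.Pairwise (fun a b => b ≤ a) →
      rest.foldl pvStep (some m, none) = (some m, pvFindLt m rest) := by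
  intro rest
  induction rest with
  | nil => intro _ _; rfl
  | cons n t ih =>
    intro hle hpw
    have hnm : n ≤ m := hle n (List.mem_cons_self)
    rw [List.pairwise_cons] at hpw
    by_cases h : n < m
    · have hstep : pvStep (some m, none) n = (some m, some n) := by
        simp only [pvStep]
        rw [if_neg (by omega : ¬ m < n), if_pos (by omega : n ≠ m)]
      rw [List.foldl_cons, hstep, pvFindLt, if_pos h]
      exact foldl_pvStep_frozen m n h t hpw.1
    · have hnm' : n = m := by omega
      have hstep : pvStep (some m, none) n = (some m, none) := by
        simp only [pvStep]
        rw [if_neg (by omega : ¬ m < n), if_neg (by omega : ¬ n ≠ m)]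
      rw [List.foldl_cons, hstep, pvFindLt, if_neg h]
      exact ih (fun x hx => hle x (List.mem_cons_of_mem _ hx)) hpw.2

-- ===== VERDICT (by name: the statement is the Claim_ definition above) =====
theorem max_two_in_list_spec : Claim_equal_max_two_in_list := by
  intro numbers _
  unfold Spec_max_two_in_list max_two_in_list max_two_in_list_alt
  rw [foldl_pvStep_perm (PySem.List.sorted_perm numbers (fun x => x) true).symm]
  have hpw := PySem.List.sorted_pairwise_rev numbers (fun x => x)
  cases hs : PySem.List.sorted numbers (fun x => x) true with
  | nil => rfl
  | cons m rest =>
    rw [hs] at hpw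
    rw [List.pairwise_cons] at hpw
    cases rest with
    | nil => rfl
    | cons n t =>
      simp only [List.foldl_cons]
      have hstep : pvStep (none, none) m = (some m, none) := rfl
      rw [hstep]
      exact (foldl_pvStep_sorted m (n :: t) hpw.1 hpw.2).symm
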